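-- pv_equiv track=rewrite | github.com/Patbmcdonald/Advent-of-code-2022 | aoc/year_2022/solutions/day6.py | get_first_start_of_packet
-- ===== SOURCE A (Python) =====
-- def get_first_start_of_packet(line, size):
--     index = 0
--     data_packet = ''
--     for char in line:
--         data_packet = (data_packet + char)[-size:]
--         # If our seen packet is euqal to our size due to the set, (removes duolicate characters), we know its the answer
--         if len(set(data_packet)) == size:
--             return index + 1
--
--         index = index + 1
-- ===== SOURCE B (Python) =====
-- def get_first_start_of_packet(line, size):
--     # O(n) sliding window: per-character counts plus a distinct counter,
--     # updated incrementally instead of rebuilding a set for every position.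
--     if size <= 0:
--         return None
--     counts = {}
--     distinct = 0
--     for i, ch in enumerate(line):
--         counts[ch] = counts.get(ch, 0) + 1
--         if counts[ch] == 1:
--             distinct += 1
--         if i >= size:
--             old = line[i - size]
--             counts[old] = counts[old] - 1
--             if counts[old] == 0:
--                 distinct -= 1
--         if distinct == size:
--             return i + 1
--     return None
-- ===== Notes on version B (the rewrite author's own statement) =====
-- stated objective: faster
-- what changed: Replaces rebuilding the window string and a fresh set at every position with a single-pass sliding window keeping per-character counts and a distinct counter updated incrementally.
import Mathlib
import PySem

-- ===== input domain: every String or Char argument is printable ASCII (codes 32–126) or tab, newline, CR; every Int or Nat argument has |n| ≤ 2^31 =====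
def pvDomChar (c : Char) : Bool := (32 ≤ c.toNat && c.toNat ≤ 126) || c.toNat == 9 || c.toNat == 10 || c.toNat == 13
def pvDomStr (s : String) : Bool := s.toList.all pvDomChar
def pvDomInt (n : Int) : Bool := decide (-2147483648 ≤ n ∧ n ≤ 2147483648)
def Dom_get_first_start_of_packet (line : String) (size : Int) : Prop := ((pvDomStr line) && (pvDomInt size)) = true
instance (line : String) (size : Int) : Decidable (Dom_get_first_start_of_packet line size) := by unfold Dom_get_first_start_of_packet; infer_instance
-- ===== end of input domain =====

-- B replaces A's per-position window rebuild + fresh set with a one-pass sliding window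
-- (char-count map + distinct counter); proved to return the same Option Int on all inputs.


-- ===== PORT A =====
-- loop over the characters of `line`, carrying A's `index` and `data_packet`
def pvALoop (rest : List Char) (index : Int) (dp : List Char) (size : Int) : Option Int :=
  match rest with
  | [] => none
  | c :: rs =>
    let dp' := PySem.List.slice (dp ++ [c]) (some (-size)) none   -- (data_packet + char)[-size:]
    if ((PySem.Set.ofList dp').length : Int) = size then some (index + 1)  -- len(set(data_packet)) == size
    else pvALoop rs (index + 1) dp' size

def get_first_start_of_packet (line : String) (size : Int) : Option Int :=
  pvALoop line.toList 0 [] size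

-- ===== PORT B =====
-- loop of Source B: i, counts (dict), distinct, early return; `old = line[i - size]` is always
-- in range here (size ≤ i < len(line)), so the .getD default is unreachable
def pvBLoop (rest : List Char) (i : Int) (counts : PySem.Dict Char Int) (distinct : Int)
    (line : String) (size : Int) : Option Int :=
  match rest with
  | [] => none
  | ch :: rs =>
    let c1 := counts.insert ch (counts.getD ch 0 + 1)
    let d1 := if c1.getD ch 0 = 1 then distinct + 1 else distinct
    if size ≤ i then
      let old := (PySem.Str.pyGet? line (i - size)).getD ch
      let c2 := c1.insert old (c1.getD old 0 - 1)
      let d2 := if c2.getD old 0 = 0 then d1 - 1 else d1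
      if d2 = size then some (i + 1) else pvBLoop rs (i + 1) c2 d2 line size
    else
      if d1 = size then some (i + 1) else pvBLoop rs (i + 1) c1 d1 line size

def get_first_start_of_packet_alt (line : String) (size : Int) : Option Int :=
  if size ≤ 0 then none
  else pvBLoop line.toList 0 PySem.Dict.empty 0 line size

-- ===== PRECONDITION & SPEC =====
def Spec_get_first_start_of_packet (line : String) (size : Int) (out : Option Int) : Prop := out = get_first_start_of_packet_alt line size
instance (line : String) (size : Int) (out : Option Int) : Decidable (Spec_get_first_start_of_packet line size out) := by unfold Spec_get_first_start_of_packet; infer_instance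

-- ===== CLAIM (what is proved, stated in full; the proofs are below) =====
def Claim_equal_get_first_start_of_packet : Prop := ∀ (line : String) (size : Int), Dom_get_first_start_of_packet line size → Spec_get_first_start_of_packet line size (get_first_start_of_packet line size)

-- ===== LEMMAS AND PROOFS =====

-- A's data_packet after processing the prefix `pre` (for 0 < size): the last `s` chars of `pre`
def pvWindow (pre : List Char) (s : Nat) : List Char := pre.drop (pre.length - s)

-- len(set(l)) counts the distinct characters of l
lemma pv_ofList_length (l : List Char) : (PySem.Set.ofList l).length = l.toFinset.card := by
  have h1 : (PySem.Set.ofList l).toFinset = l.toFinset := by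
    ext x; simp [List.mem_toFinset, PySem.Set.mem_ofList]
  rw [← List.toFinset_card_of_nodup (PySem.Set.nodup_ofList l), h1]

lemma pv_card_snoc (l : List Char) (c : Char) :
    (l ++ [c]).toFinset.card = l.toFinset.card + (if c ∈ l then 0 else 1) := by
  by_cases h : c ∈ l <;>
    simp [List.toFinset_append, Finset.union_singleton, Finset.card_insert_of_notMem, h,
      Finset.insert_eq_self.mpr, List.mem_toFinset]

lemma pv_card_cons (t : List Char) (c : Char) :
    (c :: t).toFinset.card = t.toFinset.card + (if c ∈ t then 0 else 1) := by
  by_cases h : c ∈ t <;>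
    simp [Finset.card_insert_of_notMem, h, Finset.insert_eq_self.mpr, List.mem_toFinset]

-- the slice A takes is exactly the next window
lemma pv_window_snoc (pre : List Char) (c : Char) (s : Nat) (hs : 1 ≤ s) :
    (pvWindow pre s ++ [c]).drop ((pvWindow pre s ++ [c]).length - s) = pvWindow (pre ++ [c]) s := by
  unfold pvWindow
  rw [← List.drop_append_of_le_length (by omega), List.drop_drop]
  congr 1
  simp only [List.length_drop, List.length_append, List.length_cons, List.length_nil]
  omega

-- rewrite an `if` whose condition is an Int equation through an iff
lemma hcount1_iff {P : Prop} [Decidable P] {x : Int} {a b : Int}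
    (h : x = 1 ↔ P) : (if x = 1 then a else b) = (if P then a else b) := by
  by_cases hp : P
  · rw [if_pos (h.mpr hp), if_pos hp]
  · rw [if_neg (fun hx => hp (h.mp hx)), if_neg hp]

lemma hcount0_iff {P : Prop} [Decidable P] {x : Int} {a b : Int}
    (h : x = 0 ↔ P) : (if x = 0 then a else b) = (if P then a else b) := by
  by_cases hp : P
  · rw [if_pos (h.mpr hp), if_pos hp]
  · rw [if_neg (fun hx => hp (h.mp hx)), if_neg hp]

-- main invariant: with 0 < size, A's loop on state (index, window) equals B's loop on
-- (index, counts, distinct) whenever counts/distinct describe the same window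
lemma pv_loop_eq (line : String) (size : Int) (hs : 0 < size)
    (rest : List Char) : ∀ (pre : List Char) (counts : PySem.Dict Char Int),
    line.toList = pre ++ rest →
    (∀ c, counts.getD c 0 = ((pvWindow pre size.toNat).count c : Int)) →
    pvALoop rest (pre.length : Int) (pvWindow pre size.toNat) size
      = pvBLoop rest (pre.length : Int) counts (((pvWindow pre size.toNat).toFinset.card : Int)) line size := by
  induction rest with
  | nil => intro _ _ _ _; rfl
  | cons c rs ih =>
    intro pre counts hfull hc
    have hsz : size = ((size.toNat : Nat) : Int) := by omega
    have hs1 : 1 ≤ size.toNat := by omega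
    set s := size.toNat with hsdef
    set dp := pvWindow pre s with hdp
    have hdplen : dp.length = pre.length - (pre.length - s) := by
      simp [hdp, pvWindow]
    -- A's new window
    have hslice : PySem.List.slice (dp ++ [c]) (some (-size)) none = pvWindow (pre ++ [c]) s := by
      rw [hsz, PySem.List.slice_from_neg_natCast _ _ (by omega)]
      exact hdp ▸ pv_window_snoc pre c s hs1
    -- counts after the insert of ch
    have hc1 : ∀ x, ((counts.insert c (counts.getD c 0 + 1)).getD x 0) = ((dp ++ [c]).count x : Int) := by
      intro x
      rw [PySem.Dict.getD_insert]
      by_cases hx : x = c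
      · simp [hx, hc, List.count_append]
      · simp [hx, hc, List.count_append, List.count_cons, Ne.symm hx]
    have hcast1 : (((pre ++ [c]).length : Nat) : Int) = (pre.length : Int) + 1 := by
      simp
    simp only [pvALoop, pvBLoop, hslice]
    by_cases hil : size ≤ (pre.length : Int)
    · -- window is full: B also evicts line[i - size]
      have hls : s ≤ pre.length := by omega
      have hdpfull : dp.length = s := by omega
      obtain ⟨d0, t, hdt⟩ : ∃ d0 t, dp = d0 :: t := by
        cases hdp' : dp with
        | nil => rw [hdp'] at hdpfull; simp at hdpfull; omega
        | cons a b => exact ⟨a, b, rfl⟩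
      -- the evicted char is the head of the current window
      have hold : PySem.Str.pyGet? line ((pre.length : Int) - size) = some d0 := by
        have hidx : ((pre.length : Int) - size) = (((pre.length - s : Nat) : Nat) : Int) := by
          rw [hsz]; omega
        rw [hidx]
        simp only [PySem.Str.pyGet?, hfull]
        rw [show PySem.Chars.pyGet? = (PySem.List.pyGet? (α := Char)) from rfl,
          PySem.List.pyGet?_natCast, ← List.head?_drop,
          List.drop_append_of_le_length (by omega)]
        rw [show pre.drop (pre.length - s) = d0 :: t from hdt]
        rfl
      have ht : t.length = s - 1 := by rw [hdt] at hdpfull; simp at hdpfull; omega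
      have holdD : (PySem.Str.pyGet? line ((pre.length : Int) - size)).getD c = d0 := by
        rw [hold]; rfl
      -- next window = t ++ [c]
      have hwin' : pvWindow (pre ++ [c]) s = t ++ [c] := by
        rw [← hslice, hsz, PySem.List.slice_from_neg_natCast _ _ (by omega), hdt]
        rw [show (d0 :: t ++ [c]).length - s = 1 by simp; omega]
        rfl
      -- counts after the eviction
      have hc2 : ∀ x, (((counts.insert c (counts.getD c 0 + 1)).insert d0
            ((counts.insert c (counts.getD c 0 + 1)).getD d0 0 - 1)).getD x 0)
          = ((t ++ [c]).count x : Int) := by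
        intro x
        rw [PySem.Dict.getD_insert]
        by_cases hx : x = d0
        · rw [if_pos hx, hc1, hx, hdt]
          simp [List.count_cons]
        · rw [if_neg hx, hc1, hdt]
          simp [List.count_cons, Ne.symm hx]
      -- distinct counter after both updates = distinct chars of the new window
      have hd2 : (if ((counts.insert c (counts.getD c 0 + 1)).insert d0
              ((counts.insert c (counts.getD c 0 + 1)).getD d0 0 - 1)).getD d0 0 = 0 then
            (if (counts.insert c (counts.getD c 0 + 1)).getD c 0 = 1 then ((dp.toFinset.card : Int)) + 1 else (dp.toFinset.card : Int)) - 1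
          else
            (if (counts.insert c (counts.getD c 0 + 1)).getD c 0 = 1 then ((dp.toFinset.card : Int)) + 1 else (dp.toFinset.card : Int)))
          = (((t ++ [c]).toFinset.card : Int)) := by
        rw [hc2, hc1]
        have hcount1 : ((dp ++ [c]).count c : Int) = 1 ↔ c ∉ dp := by
          simp [List.count_append]
          constructor
          · intro h hmem; have := List.count_pos_iff.mpr hmem; omega
          · intro h; simp [List.count_eq_zero_of_not_mem h]
        have hcount0 : ((t ++ [c]).count d0 : Int) = 0 ↔ d0 ∉ t ++ [c] := by
          constructor
          · intro h hmem; have := List.count_pos_iff.mpr hmem; omega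
          · intro h; simp [List.count_eq_zero_of_not_mem h]
        have hcards : (dp ++ [c]).toFinset.card = (t ++ [c]).toFinset.card + (if d0 ∈ t ++ [c] then 0 else 1) := by
          rw [hdt]
          exact pv_card_cons (t ++ [c]) d0
        have hcardc : (dp ++ [c]).toFinset.card = dp.toFinset.card + (if c ∈ dp then 0 else 1) :=
          pv_card_snoc dp c
        rw [hcount0_iff hcount0, hcount1_iff hcount1]
        by_cases h1 : c ∈ dp <;> by_cases h2 : d0 ∈ t ++ [c] <;>
          simp only [h1, h2, not_true_eq_false, not_false_eq_true, if_true, if_false] at hcards hcardc ⊢ <;> omega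
      rw [if_pos hil, holdD]
      by_cases hret : (((t ++ [c]).toFinset.card : Nat) : Int) = size
      · rw [if_pos (show _ from by rw [hwin', pv_ofList_length]; exact hret),
          if_pos (hd2.trans hret)]
      · rw [if_neg (show _ from by rw [hwin', pv_ofList_length]; exact hret),
          if_neg (fun h => hret (hd2.symm.trans h))]
        have := ih (pre ++ [c])
          ((counts.insert c (counts.getD c 0 + 1)).insert d0
            ((counts.insert c (counts.getD c 0 + 1)).getD d0 0 - 1))
          (by rw [hfull]; simp)
          (by intro x; rw [hwin']; exact hc2 x)
        rw [hwin', hcast1, ← hd2] at this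
        rw [hwin']
        exact this
    · -- window not yet full: no eviction; new window = dp ++ [c]
      have hl : pre.length < s := by omega
      have hwin' : pvWindow (pre ++ [c]) s = dp ++ [c] := by
        rw [hdp]
        unfold pvWindow
        rw [show (pre ++ [c]).length - s = 0 by simp; omega,
          show pre.length - s = 0 by omega]
        simp
      have hd1 : (if (counts.insert c (counts.getD c 0 + 1)).getD c 0 = 1
              then ((dp.toFinset.card : Int)) + 1 else (dp.toFinset.card : Int))
          = (((dp ++ [c]).toFinset.card : Int)) := by
        rw [hc1]
        have hcount1 : ((dp ++ [c]).count c : Int) = 1 ↔ c ∉ dp := by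
          simp [List.count_append]
          constructor
          · intro h hmem; have := List.count_pos_iff.mpr hmem; omega
          · intro h; simp [List.count_eq_zero_of_not_mem h]
        have hcardc : (dp ++ [c]).toFinset.card = dp.toFinset.card + (if c ∈ dp then 0 else 1) :=
          pv_card_snoc dp c
        rw [hcount1_iff hcount1]
        by_cases h1 : c ∈ dp <;>
          simp only [h1, not_true_eq_false, not_false_eq_true, if_true, if_false] at hcardc ⊢ <;> omega
      rw [if_neg hil]
      by_cases hret : (((dp ++ [c]).toFinset.card : Nat) : Int) = size
      · rw [if_pos (show _ from by rw [hwin', pv_ofList_length]; exact hret),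
          if_pos (hd1.trans hret)]
      · rw [if_neg (show _ from by rw [hwin', pv_ofList_length]; exact hret),
          if_neg (fun h => hret (hd1.symm.trans h))]
        have := ih (pre ++ [c]) (counts.insert c (counts.getD c 0 + 1))
          (by rw [hfull]; simp)
          (by intro x; rw [hwin']; exact hc1 x)
        rw [hwin', hcast1, ← hd1] at this
        rw [hwin']
        exact this

-- for size ≤ 0 A's test can never fire, so A returns none (as B does immediately)
lemma pv_aloop_nonpos (size : Int) (hs : size ≤ 0) (rest : List Char) :
    ∀ (idx : Int) (dp : List Char), pvALoop rest idx dp size = none := by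
  induction rest with
  | nil => intro _ _; rfl
  | cons c rs ih =>
    intro idx dp
    simp only [pvALoop]
    rw [if_neg, ih]
    intro hcontra
    rcases lt_or_eq_of_le hs with hlt | heq
    · have : (0 : Int) ≤ ((PySem.Set.ofList (PySem.List.slice (dp ++ [c]) (some (-size)) none)).length : Int) := by positivity
      omega
    · subst heq
      rw [neg_zero, PySem.List.slice_from _ (le_refl 0)] at hcontra
      have hmem : c ∈ PySem.Set.ofList (List.drop (0:Int).toNat (dp ++ [c])) := by
        rw [PySem.Set.mem_ofList]
        simp
      have hne : PySem.Set.ofList (List.drop (0:Int).toNat (dp ++ [c])) ≠ [] :=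
        List.ne_nil_of_mem hmem
      have : (PySem.Set.ofList (List.drop (0:Int).toNat (dp ++ [c]))).length ≠ 0 :=
        fun h => hne (List.length_eq_zero_iff.mp h)
      omega

-- ===== VERDICT (by name: the statement is the Claim_ definition above) =====
theorem get_first_start_of_packet_spec : Claim_equal_get_first_start_of_packet := by
  intro line size _
  unfold Spec_get_first_start_of_packet get_first_start_of_packet get_first_start_of_packet_alt
  by_cases hs : size ≤ 0
  · rw [if_pos hs]; exact pv_aloop_nonpos size hs _ 0 []
  · rw [if_neg hs]
    have h0 : pvWindow [] size.toNat = [] := by simp [pvWindow]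
    have := pv_loop_eq line size (by omega) line.toList [] PySem.Dict.empty (by simp)
      (by intro c; simp [h0, PySem.Dict.getD_empty])
    simpa [h0] using this
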